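-- pv_equiv track=rewrite | github.com/mickyabir/Quantum-Abstract-Interpretation | constraintsUtil.py | splitDomain
-- ===== SOURCE A (Python) =====
-- def splitDomain(S, F):
--     # return splitDomainNew(S, F)
--
--     # If the domain is the single domain:
--     if max(len(s) for s in S) == 1:
--         return [S.index([f]) for f in F]
--     elif len(S) == 1:
--         return [0]
--
--     # For now, assume domain of the form (i, i + 1)
--     # TODO: Generalize
--     # TODO: Optimize if statements/write better
--     pairedF = []
--     i = 0
--     while i < len(F):
--         if i < len(F) - 1 and F[i] + 1 == F[i + 1]:
--             pairedF.append([F[i], F[i + 1]])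
--             i += 2
--         else:
--             pairedF.append([F[i]])
--             i += 1
--
--     idxF = 0
--     indexList = []
--     for i in range(len(S)):
--         if idxF >= len(pairedF):
--             return indexList
--
--         si = S[i]
--
--         if len(pairedF[idxF]) == 2 and pairedF[idxF] == si:
--             indexList.append(i)
--             idxF += 1
--         elif len(pairedF[idxF]) == 1 and pairedF[idxF][0] in si:
--             indexList.append(i)
--             idxF += 1
--
--     return indexList
-- ===== SOURCE B (Python) =====
-- def splitDomain(S, F):
--     # If the domain is the single domain:
--     if max(len(s) for s in S) == 1:
--         first = {}
--         for i, s in enumerate(S):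
--             k = tuple(s)
--             if k not in first:
--                 first[k] = i
--         return [first[(f,)] for f in F]
--     elif len(S) == 1:
--         return [0]
--
--     # greedy pairing, one pass with a pending element
--     pairedF = []
--     pending = None
--     for x in F:
--         if pending is None:
--             pending = x
--         elif pending + 1 == x:
--             pairedF.append([pending, x])
--             pending = None
--         else:
--             pairedF.append([pending])
--             pending = x
--     if pending is not None:
--         pairedF.append([pending])
--
--     # hash index over S: candidate S-indices per pair-tuple and per member value,
--     # each list increasing; replaces the linear scan of S
--     pairsIdx = {}
--     for i, s in enumerate(S):
--         pairsIdx.setdefault(tuple(s), []).append(i)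
--     singlesIdx = {}
--     for i, s in enumerate(S):
--         for v in s:
--             singlesIdx.setdefault(v, []).append(i)
--
--     indexList = []
--     j = 0
--     for entry in pairedF:
--         cand = pairsIdx.get(tuple(entry), []) if len(entry) == 2 else singlesIdx.get(entry[0], [])
--         k = next((c for c in cand if c >= j), None)
--         if k is None:
--             break
--         indexList.append(k)
--         j = k + 1
--     return indexList
-- ===== Notes on version B (the rewrite author's own statement) =====
-- stated objective: alternative
-- what changed: B replaces A's linear scans with hash indexes built once over S: the single-domain branch uses a first-occurrence dict instead of repeated list.index, and the paired branch builds candidate-index lists per pair-tuple and per member value, then walks the paired entries (produced by a one-pass pending-element fold instead of A's index-stepping while loop) taking from each candidate list the first index past a forward pointer, instead of A's outer loop over all S indices advancing a pointer into pairedF.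
-- outside the precondition, e.g. on splitDomain([], [1]): A raises ValueError, B raises ValueError; on splitDomain([[0], [1]], [5]): A raises ValueError, B raises KeyError
import Mathlib
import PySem

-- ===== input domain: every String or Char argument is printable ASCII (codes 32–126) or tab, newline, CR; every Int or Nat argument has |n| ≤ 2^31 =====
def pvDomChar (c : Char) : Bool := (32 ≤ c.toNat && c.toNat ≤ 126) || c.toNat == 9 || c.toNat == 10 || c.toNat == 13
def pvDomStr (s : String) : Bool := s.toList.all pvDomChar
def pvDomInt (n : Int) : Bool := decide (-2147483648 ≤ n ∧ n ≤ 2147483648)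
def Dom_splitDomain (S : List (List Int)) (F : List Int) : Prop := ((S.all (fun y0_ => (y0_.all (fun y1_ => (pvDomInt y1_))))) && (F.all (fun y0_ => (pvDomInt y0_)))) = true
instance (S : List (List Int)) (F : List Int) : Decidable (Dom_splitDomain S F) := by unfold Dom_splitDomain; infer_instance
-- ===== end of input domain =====

-- B replaces A's linear scans with hash indexes: a first-occurrence dict for the single-domain branch,
-- and per-key candidate-index lists (dicts built once over S) consulted with a forward pointer for the
-- paired branch; the pairing is a one-pass pending-element fold instead of A's index-stepping while loop
-- (objective: alternative; return-value equivalence on Pre_).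

-- ===== PORT A =====

-- A's while-loop building pairedF, indexed by i
def pairLoopA (F : List Int) (i : Nat) : List (List Int) :=
  if i < F.length then
    if i < F.length - 1 ∧ F.getD i 0 + 1 = F.getD (i + 1) 0 then
      [F.getD i 0, F.getD (i + 1) 0] :: pairLoopA F (i + 2)
    else
      [F.getD i 0] :: pairLoopA F (i + 1)
  else []
termination_by F.length - i

-- A's 'for i in range(len(S))' scan with pointer idxF and accumulator
def scanA (S : List (List Int)) (pF : List (List Int)) (i idxF : Nat) (acc : List Int) : List Int :=
  if i < S.length then
    if idxF ≥ pF.length then acc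
    else
      let si := S.getD i []
      let p := pF.getD idxF []
      if p.length = 2 ∧ p = si then
        scanA S pF (i + 1) (idxF + 1) (acc ++ [(i : Int)])
      else if p.length = 1 ∧ p.getD 0 0 ∈ si then
        scanA S pF (i + 1) (idxF + 1) (acc ++ [(i : Int)])
      else
        scanA S pF (i + 1) idxF acc
  else acc
termination_by S.length - i

def splitDomain (S : List (List Int)) (F : List Int) : List Int :=
  if (PySem.List.max? (S.map fun s => (s.length : Int)) (fun x => x)).getD 0 = 1 then
    F.map (fun f => (((PySem.List.index? S [f]).getD 0 : Nat) : Int))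
  else if S.length = 1 then [0]
  else
    let pairedF := pairLoopA F 0
    scanA S pairedF 0 0 []

-- ===== PORT B =====

-- B's first-occurrence dict for the single-domain branch
def firstOccB (S : List (List Int)) : PySem.Dict (List Int) Int :=
  (PySem.List.enumerate S 0).foldl
    (fun d p => if d.contains p.2 then d else d.insert p.2 p.1) PySem.Dict.empty

-- B's one-pass pairing fold with a pending element
def pairStep (st : Option Int × List (List Int)) (x : Int) : Option Int × List (List Int) :=
  match st with
  | (none, acc) => (some x, acc)
  | (some p, acc) => if p + 1 = x then (none, acc ++ [[p, x]]) else (some x, acc ++ [[p]])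

-- B's trailing 'if pending is not None: pairedF.append([pending])'
def pairFlush (st : Option Int × List (List Int)) : List (List Int) :=
  match st.1 with
  | none => st.2
  | some p => st.2 ++ [[p]]

-- B's hash index: S-indices per pair key
def pairsIdxB (S : List (List Int)) : PySem.Dict (List Int) (List Int) :=
  (PySem.List.enumerate S 0).foldl
    (fun d p => d.modify p.2 [] (fun l => l ++ [p.1])) PySem.Dict.empty

-- B's hash index: S-indices per member value
def singlesIdxB (S : List (List Int)) : PySem.Dict Int (List Int) :=
  (PySem.List.enumerate S 0).foldl
    (fun d p => p.2.foldl (fun d2 v => d2.modify v [] (fun l => l ++ [p.1])) d) PySem.Dict.empty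

-- B's 'next((c for c in cand if c >= j), None)'
def firstGE (j : Int) : List Int → Option Int
  | [] => none
  | c :: r => if j ≤ c then some c else firstGE j r

-- B's loop over the paired entries with forward pointer j
def phase2 (dp : PySem.Dict (List Int) (List Int)) (ds : PySem.Dict Int (List Int)) :
    List (List Int) → Int → List Int
  | [], _ => []
  | e :: rest, j =>
    let cand := if e.length = 2 then dp.getD e [] else ds.getD (e.getD 0 0) []
    match firstGE j cand with
    | none => []
    | some k => k :: phase2 dp ds rest (k + 1)

def splitDomain_alt (S : List (List Int)) (F : List Int) : List Int :=
  if (PySem.List.max? (S.map fun s => (s.length : Int)) (fun x => x)).getD 0 = 1 then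
    F.map (fun f => (((firstOccB S).get? [f]).getD 0))
  else if S.length = 1 then [0]
  else phase2 (pairsIdxB S) (singlesIdxB S) (pairFlush (F.foldl pairStep (none, []))) 0

-- ===== PRECONDITION & SPEC =====
-- Pre_ excludes exactly the inputs where the Python A raises: empty S (max() over an empty
-- generator raises ValueError) and, when the 'single domain' branch is taken (all entries of S
-- of length ≤ 1, some of length 1), an f ∈ F with [f] not in S (S.index raises ValueError).
def Pre_splitDomain (S : List (List Int)) (F : List Int) : Prop :=
  S ≠ [] ∧ (((∀ s ∈ S, s.length ≤ 1) ∧ (∃ s ∈ S, s.length = 1)) → ∀ f ∈ F, [f] ∈ S)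
instance (S : List (List Int)) (F : List Int) : Decidable (Pre_splitDomain S F) := by
  unfold Pre_splitDomain; infer_instance

def pvWitness_splitDomain : List (List Int) × List Int := ([[0, 1], [2]], [0, 1, 2])

def Spec_splitDomain (S : List (List Int)) (F : List Int) (out : List Int) : Prop := out = splitDomain_alt S F
instance (S : List (List Int)) (F : List Int) (out : List Int) : Decidable (Spec_splitDomain S F out) := by unfold Spec_splitDomain; infer_instance

-- ===== CLAIM (what is proved, stated in full; the proofs are below) =====
def Claim_equal_splitDomain : Prop := ∀ (S : List (List Int)) (F : List Int), Dom_splitDomain S F → Pre_splitDomain S F → Spec_splitDomain S F (splitDomain S F)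

-- ===== LEMMAS AND PROOFS =====

-- ---- branch 1: first-occurrence dict = list.index ----

theorem firstOcc_fold_some (l : List (Int × List Int)) :
    ∀ (d : PySem.Dict (List Int) Int) (key : List Int) (v : Int), d.get? key = some v →
      (l.foldl (fun d p => if d.contains p.2 then d else d.insert p.2 p.1) d).get? key = some v := by
  induction l with
  | nil => intro d key v hv; simpa using hv
  | cons p rest ih =>
    intro d key v hv
    simp only [List.foldl_cons]
    by_cases hc : d.contains p.2 = true
    · rw [if_pos hc]; exact ih d key v hv
    · rw [if_neg hc]
      apply ih _ key v
      rw [PySem.Dict.get?_insert]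
      have hk : key ≠ p.2 := by
        intro he
        rw [he] at hv
        rw [(PySem.Dict.get?_eq_none_iff_contains d p.2).2 (by simpa using hc)] at hv
        simp at hv
      rw [if_neg hk]; exact hv

theorem firstOcc_fold_none (l : List (Int × List Int)) :
    ∀ (d : PySem.Dict (List Int) Int) (key : List Int), d.get? key = none →
      (l.foldl (fun d p => if d.contains p.2 then d else d.insert p.2 p.1) d).get? key =
        (l.find? (fun p => p.2 == key)).map (·.1) := by
  induction l with
  | nil => intro d key hv; simpa using hv
  | cons p rest ih =>
    intro d key hv
    simp only [List.foldl_cons, List.find?_cons]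
    by_cases hk : p.2 = key
    · have hb : (p.2 == key) = true := by simpa [beq_iff_eq] using hk
      rw [hb]
      have hc : d.contains p.2 = false := by
        rw [← hk] at hv
        rw [← Bool.not_eq_true]
        intro hct
        rw [PySem.Dict.get?_eq_none_iff_contains] at hv
        simp [hct] at hv
      rw [if_neg (by simp [hc])]
      rw [firstOcc_fold_some rest _ key p.1 (by rw [PySem.Dict.get?_insert, if_pos hk.symm])]
      rfl
    · have hb : (p.2 == key) = false := by simpa [beq_iff_eq] using hk
      rw [hb]
      by_cases hc : d.contains p.2 = true
      · rw [if_pos hc]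
        exact ih d key hv
      · rw [if_neg hc]
        apply ih
        rw [PySem.Dict.get?_insert, if_neg (fun h => hk h.symm)]
        exact hv

theorem find?_enumerate_eq_index? (S : List (List Int)) :
    ∀ (n : Int) (key : List Int),
      ((PySem.List.enumerate S n).find? (fun p => p.2 == key)).map (·.1) =
        (PySem.List.index? S key).map (fun k => n + (k : Int)) := by
  induction S with
  | nil => intro n key; simp [PySem.List.enumerate_nil, PySem.List.index?_eq_idxOf?, List.idxOf?]
  | cons s rest ih =>
    intro n key
    rw [PySem.List.enumerate_cons]
    by_cases hk : s = key
    · subst hk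
      rw [PySem.List.index?_cons_self]
      simp [List.find?_cons]
    · rw [PySem.List.index?_cons_of_ne _ hk]
      have hb : (s == key) = false := by simpa [beq_iff_eq] using hk
      rw [List.find?_cons, hb, ih (n + 1) key]
      cases h : PySem.List.index? rest key with
      | none => simp
      | some k => simp; push_cast; ring

theorem firstOcc_get?_of_mem (S : List (List Int)) (key : List Int) (h : key ∈ S) :
    (firstOccB S).get? key = (PySem.List.index? S key).map (fun k => (k : Int)) := by
  unfold firstOccB
  rw [firstOcc_fold_none _ _ _ (PySem.Dict.get?_empty _), find?_enumerate_eq_index? S 0 key]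
  cases hidx : PySem.List.index? S key with
  | none => rw [PySem.List.index?_eq_none_iff] at hidx; exact absurd h hidx
  | some k => simp

-- ---- pairing: A's while loop = B's pending fold ----

-- proof-side characterisation of B's pairing fold
def pairAux : Option Int → List Int → List (List Int)
  | none, [] => []
  | some p, [] => [[p]]
  | none, x :: rest => pairAux (some x) rest
  | some p, x :: rest => if p + 1 = x then [p, x] :: pairAux none rest else [p] :: pairAux (some x) rest

theorem fold_pairAux (F : List Int) : ∀ (pending : Option Int) (acc : List (List Int)),
    pairFlush (F.foldl pairStep (pending, acc)) = acc ++ pairAux pending F := by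
  induction F with
  | nil => intro pending acc; cases pending <;> simp [pairFlush, pairAux]
  | cons x rest ih =>
    intro pending acc
    cases pending with
    | none => simp [pairStep, ih, pairAux]
    | some p =>
      by_cases hp : p + 1 = x
      · simp [pairStep, hp, ih, pairAux]
      · simp [pairStep, hp, ih, pairAux]

theorem pairAux_len (F : List Int) : ∀ (pending : Option Int), ∀ e ∈ pairAux pending F, e.length = 1 ∨ e.length = 2 := by
  induction F with
  | nil =>
    intro pending e he
    cases pending
    · simp [pairAux] at he
    · simp [pairAux] at he; simp [he]
  | cons x rest ih =>
    intro pending e he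
    cases pending with
    | none => exact ih (some x) e he
    | some p =>
      by_cases hp : p + 1 = x
      · simp only [pairAux, if_pos hp, List.mem_cons] at he
        rcases he with he | he
        · simp [he]
        · exact ih none e he
      · simp only [pairAux, if_neg hp, List.mem_cons] at he
        rcases he with he | he
        · simp [he]
        · exact ih (some x) e he

-- A's index-stepping pairing loop equals B's pairing fold on the remaining suffix
theorem pairLoopA_eq_pairAux (F : List Int) (i : Nat) : pairLoopA F i = pairAux none (F.drop i) := by
  fun_induction pairLoopA F i with
  | case1 i h hc ih =>
    obtain ⟨h1, h2⟩ := hc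
    have hi1 : i + 1 < F.length := by omega
    rw [List.getD_eq_getElem _ _ h, List.getD_eq_getElem _ _ hi1] at h2 ⊢
    rw [List.drop_eq_getElem_cons h, List.drop_eq_getElem_cons hi1, ih]
    simp [pairAux, h2]
  | case2 i h hc ih =>
    rw [List.getD_eq_getElem _ _ h]
    rw [List.drop_eq_getElem_cons h, ih]
    rcases Nat.lt_or_ge (i + 1) F.length with hi1 | hi1
    · rw [List.drop_eq_getElem_cons hi1]
      have hne : F[i] + 1 ≠ F[i + 1] := by
        intro he
        exact hc ⟨by omega, by rw [List.getD_eq_getElem _ _ h, List.getD_eq_getElem _ _ hi1]; exact he⟩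
      simp [pairAux, hne]
    · rw [List.drop_eq_nil_of_le hi1]
      simp [pairAux]
  | case3 i h =>
    rw [List.drop_eq_nil_of_le (by omega)]
    rfl

-- ---- the pointer form of A's scan (proof-side intermediate) ----

def findIdxB (S : List (List Int)) (e : List Int) (j : Nat) : Option Nat :=
  if j < S.length then
    if (if e.length = 2 then e = S.getD j [] else e.getD 0 0 ∈ S.getD j []) then some j
    else findIdxB S e (j + 1)
  else none
termination_by S.length - j

def scanB (S : List (List Int)) : List (List Int) → Nat → List Int
  | [], _ => []
  | e :: rest, j =>
    match findIdxB S e j with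
    | none => []
    | some k => (k : Int) :: scanB S rest (k + 1)

theorem scanA_eq_scanB (S : List (List Int)) (pF : List (List Int))
    (hlen : ∀ e ∈ pF, e.length = 1 ∨ e.length = 2) :
    ∀ (i idxF : Nat) (acc : List Int),
      scanA S pF i idxF acc = acc ++ scanB S (pF.drop idxF) i := by
  intro i idxF acc
  fun_induction scanA S pF i idxF acc with
  | case1 i idxF acc h1 h2 =>
    rw [List.drop_eq_nil_of_le (by omega)]
    simp [scanB]
  | case2 i idxF acc h1 h2 si p hp ih =>
    simp only [p, si] at hp
    have hidx : idxF < pF.length := by omega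
    have hpg : pF.getD idxF [] = pF[idxF] := List.getD_eq_getElem _ _ hidx
    rw [hpg] at hp
    rw [ih, List.drop_eq_getElem_cons hidx, scanB]
    have hm : findIdxB S (pF[idxF]) i = some i := by
      rw [findIdxB, if_pos h1, if_pos (by rw [if_pos hp.1]; exact hp.2)]
    rw [hm]
    simp
  | case3 i idxF acc h1 h2 si p hp1 hp ih =>
    simp only [p, si] at hp
    have hidx : idxF < pF.length := by omega
    have hpg : pF.getD idxF [] = pF[idxF] := List.getD_eq_getElem _ _ hidx
    rw [hpg] at hp
    rw [ih, List.drop_eq_getElem_cons hidx, scanB]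
    have hm : findIdxB S (pF[idxF]) i = some i := by
      rw [findIdxB, if_pos h1, if_pos (by rw [if_neg (by simp [hp.1])]; exact hp.2)]
    rw [hm]
    simp
  | case4 i idxF acc h1 h2 si p hp1 hp2 ih =>
    simp only [p, si] at hp1 hp2
    have hidx : idxF < pF.length := by omega
    have hpg : pF.getD idxF [] = pF[idxF] := List.getD_eq_getElem _ _ hidx
    rw [hpg] at hp1 hp2
    have hcond : ¬ (if (pF[idxF]).length = 2 then pF[idxF] = S.getD i [] else (pF[idxF]).getD 0 0 ∈ S.getD i []) := by
      rcases hlen (pF[idxF]) (List.getElem_mem hidx) with hl | hl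
      · rw [if_neg (by simp [hl])]
        exact fun hx => hp2 ⟨hl, hx⟩
      · rw [if_pos hl]
        exact fun hx => hp1 ⟨hl, hx⟩
    have hstep : findIdxB S (pF[idxF]) i = findIdxB S (pF[idxF]) (i + 1) := by
      rw [findIdxB, if_pos h1, if_neg hcond]
    rw [ih]
    simp only [List.drop_eq_getElem_cons hidx, scanB]
    rw [hstep]
  | case5 i idxF acc h1 =>
    cases hd : pF.drop idxF with
    | nil => simp [scanB]
    | cons e rest =>
      rw [scanB]
      have : findIdxB S e i = none := by rw [findIdxB, if_neg h1]
      rw [this]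
      simp

-- ---- characterizing B's dict candidate lists ----

theorem pairsIdx_fold_getD (l : List (Int × List Int)) :
    ∀ (d : PySem.Dict (List Int) (List Int)) (e : List Int),
      (l.foldl (fun d p => d.modify p.2 [] (fun l => l ++ [p.1])) d).getD e [] =
        d.getD e [] ++ (l.filter (fun p => p.2 == e)).map (·.1) := by
  induction l with
  | nil => intro d e; simp
  | cons p rest ih =>
    intro d e
    simp only [List.foldl_cons, List.filter_cons]
    rw [ih]
    by_cases hk : p.2 = e
    · subst hk
      rw [PySem.Dict.getD_modify]
      simp
    · have hb : (p.2 == e) = false := by simpa [beq_iff_eq] using hk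
      rw [PySem.Dict.getD_modify, if_neg (fun h => hk h.symm), hb]
      simp

theorem singles_inner_getD (s : List Int) (i : Int) :
    ∀ (d : PySem.Dict Int (List Int)) (v : Int),
      (s.foldl (fun d2 w => d2.modify w [] (fun l => l ++ [i])) d).getD v [] =
        d.getD v [] ++ (s.filter (fun w => w == v)).map (fun _ => i) := by
  induction s with
  | nil => intro d v; simp
  | cons w rest ih =>
    intro d v
    simp only [List.foldl_cons, List.filter_cons]
    rw [ih]
    by_cases hk : w = v
    · subst hk
      rw [PySem.Dict.getD_modify]
      simp
    · have hb : (w == v) = false := by simpa [beq_iff_eq] using hk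
      rw [PySem.Dict.getD_modify, if_neg (fun h => hk h.symm), hb]
      simp

theorem singlesIdx_fold_getD (l : List (Int × List Int)) :
    ∀ (d : PySem.Dict Int (List Int)) (v : Int),
      (l.foldl (fun d p => p.2.foldl (fun d2 w => d2.modify w [] (fun l => l ++ [p.1])) d) d).getD v [] =
        d.getD v [] ++ l.flatMap (fun p => (p.2.filter (fun w => w == v)).map (fun _ => p.1)) := by
  induction l with
  | nil => intro d v; simp
  | cons p rest ih =>
    intro d v
    simp only [List.foldl_cons, List.flatMap_cons]
    rw [ih, singles_inner_getD]
    simp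

-- candidate lists as functions of the enumerate list
def candP (S : List (List Int)) (n : Int) (e : List Int) : List Int :=
  ((PySem.List.enumerate S n).filter (fun p => p.2 == e)).map (·.1)

def candS (S : List (List Int)) (n : Int) (v : Int) : List Int :=
  (PySem.List.enumerate S n).flatMap (fun p => (p.2.filter (fun w => w == v)).map (fun _ => p.1))

theorem candP_spec (e : List Int) (S : List (List Int)) : ∀ (n : Int),
    ((candP S n e).Pairwise (· ≤ ·) ∧ ∀ x ∈ candP S n e, n ≤ x) ∧
    (∀ x, x ∈ candP S n e ↔ ∃ k : Nat, k < S.length ∧ x = n + (k : Int) ∧ S.getD k [] = e) := by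
  induction S with
  | nil => intro n; simp [candP, PySem.List.enumerate_nil]
  | cons s rest ih =>
    intro n
    have hdecomp : candP (s :: rest) n e =
        (if s = e then [n] else []) ++ candP rest (n + 1) e := by
      unfold candP
      rw [PySem.List.enumerate_cons, List.filter_cons]
      by_cases hs : s = e
      · simp [hs]
      · have hb : (s == e) = false := by simpa [beq_iff_eq] using hs
        simp [hb, hs]
    obtain ⟨⟨ihs, ihlb⟩, ihm⟩ := ih (n + 1)
    constructor
    · constructor
      · rw [hdecomp]
        refine List.pairwise_append.2 ⟨by split <;> simp, ihs, ?_⟩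
        intro x hx y hy
        have : x = n := by split at hx <;> simp_all
        have := ihlb y hy
        omega
      · intro x hx
        rw [hdecomp, List.mem_append] at hx
        rcases hx with hx | hx
        · split at hx <;> simp_all
        · have := ihlb x hx; omega
    · intro x
      rw [hdecomp, List.mem_append]
      constructor
      · intro hx
        rcases hx with hx | hx
        · refine ⟨0, by simp, ?_, ?_⟩ <;> split at hx <;> simp_all
        · obtain ⟨k, hk, hx, hS⟩ := (ihm x).1 hx
          exact ⟨k + 1, by simpa using hk, by push_cast; omega, by simpa using hS⟩
      · rintro ⟨k, hk, hx, hS⟩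
        cases k with
        | zero => left; simp at hS; simp [hS, hx]
        | succ m =>
          right
          exact (ihm x).2 ⟨m, by simp only [List.length_cons] at hk; omega, by push_cast at hx ⊢; omega, by simpa using hS⟩

theorem candS_spec (v : Int) (S : List (List Int)) : ∀ (n : Int),
    ((candS S n v).Pairwise (· ≤ ·) ∧ ∀ x ∈ candS S n v, n ≤ x) ∧
    (∀ x, x ∈ candS S n v ↔ ∃ k : Nat, k < S.length ∧ x = n + (k : Int) ∧ v ∈ S.getD k []) := by
  induction S with
  | nil => intro n; simp [candS, PySem.List.enumerate_nil]
  | cons s rest ih =>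
    intro n
    have hdecomp : candS (s :: rest) n v =
        (s.filter (fun w => w == v)).map (fun _ => n) ++ candS rest (n + 1) v := by
      unfold candS
      rw [PySem.List.enumerate_cons, List.flatMap_cons]
    obtain ⟨⟨ihs, ihlb⟩, ihm⟩ := ih (n + 1)
    have hhead : ∀ x ∈ (s.filter (fun w => w == v)).map (fun _ => (n : Int)), x = n := by
      intro x hx; simp at hx; tauto
    constructor
    · constructor
      · rw [hdecomp]
        refine List.pairwise_append.2 ⟨?_, ihs, ?_⟩
        · exact (List.pairwise_map).2 (List.pairwise_iff_forall_sublist.2 (fun _ => le_rfl))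
        · intro x hx y hy
          have hx' := hhead x hx
          have := ihlb y hy
          omega
      · intro x hx
        rw [hdecomp, List.mem_append] at hx
        rcases hx with hx | hx
        · rw [hhead x hx]
        · have := ihlb x hx; omega
    · intro x
      rw [hdecomp, List.mem_append]
      constructor
      · intro hx
        rcases hx with hx | hx
        · refine ⟨0, by simp, by simpa using (hhead x hx), ?_⟩
          simp only [List.mem_map, List.mem_filter, beq_iff_eq] at hx
          obtain ⟨w, ⟨hw, hwv⟩, _⟩ := hx
          simp [← hwv, hw]
        · obtain ⟨k, hk, hx, hS⟩ := (ihm x).1 hx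
          exact ⟨k + 1, by simpa using hk, by push_cast; omega, by simpa using hS⟩
      · rintro ⟨k, hk, hx, hS⟩
        cases k with
        | zero =>
          left
          simp only [List.getD_cons_zero] at hS
          refine List.mem_map.2 ⟨v, List.mem_filter.2 ⟨hS, by simp⟩, ?_⟩
          omega
        | succ m =>
          right
          exact (ihm x).2 ⟨m, by simp only [List.length_cons] at hk; omega, by push_cast at hx ⊢; omega, by simpa using hS⟩

-- ---- firstGE on a sorted candidate list computes findIdxB ----

theorem firstGE_none (j : Int) (l : List Int) (h : ∀ x ∈ l, x < j) : firstGE j l = none := by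
  induction l with
  | nil => rfl
  | cons c r ih =>
    rw [firstGE, if_neg (by have := h c (by simp); omega)]
    exact ih (fun x hx => h x (by simp [hx]))

theorem firstGE_skip (j : Int) (l : List Int) (h : j ∉ l) : firstGE j l = firstGE (j + 1) l := by
  induction l with
  | nil => rfl
  | cons c r ih =>
    have hc : c ≠ j := fun he => h (by simp [he])
    rw [firstGE, firstGE]
    by_cases hj : j ≤ c
    · rw [if_pos hj, if_pos (by omega)]
    · rw [if_neg hj, if_neg (by omega)]
      exact ih (fun hx => h (by simp [hx]))

theorem firstGE_hit (j : Int) (l : List Int) (hs : l.Pairwise (· ≤ ·)) (hm : j ∈ l) :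
    firstGE j l = some j := by
  induction l with
  | nil => simp at hm
  | cons c r ih =>
    rw [List.pairwise_cons] at hs
    rcases List.mem_cons.1 hm with he | hm'
    · rw [firstGE, if_pos (by omega)]
      simp [he]
    · have hcle : c ≤ j := hs.1 j hm'
      by_cases hj : j ≤ c
      · rw [firstGE, if_pos hj]
        have : c = j := by omega
        simp [this]
      · rw [firstGE, if_neg hj]
        exact ih hs.2 hm'

theorem firstGE_eq_findIdxB (S : List (List Int)) (e : List Int) (cand : List Int)
    (hs : cand.Pairwise (· ≤ ·))
    (hm : ∀ x, x ∈ cand ↔ ∃ k : Nat, k < S.length ∧ x = (k : Int) ∧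
      (if e.length = 2 then e = S.getD k [] else e.getD 0 0 ∈ S.getD k [])) :
    ∀ j : Nat, firstGE (j : Int) cand = (findIdxB S e j).map (fun k => (k : Int)) := by
  intro j
  fun_induction findIdxB S e j with
  | case1 j hj hcond =>
    rw [firstGE_hit _ _ hs ((hm (j : Int)).2 ⟨j, hj, rfl, hcond⟩)]
    simp
  | case2 j hj hcond ih =>
    have hnot : ((j : Nat) : Int) ∉ cand := by
      intro hx
      obtain ⟨k, hk, hke, hc⟩ := (hm _).1 hx
      have : k = j := by omega
      subst this
      exact hcond hc
    rw [firstGE_skip _ _ hnot]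
    have : ((j : Nat) : Int) + 1 = (((j + 1 : Nat)) : Int) := by push_cast; ring
    rw [this, ih]
  | case3 j hj =>
    have h0 : firstGE ((j : Nat) : Int) cand = none := by
      apply firstGE_none
      intro x hx
      obtain ⟨k, hk, hke, _⟩ := (hm x).1 hx
      omega
    rw [h0]
    simp

-- ---- scanB = phase2 with B's dicts ----

theorem scanB_eq_phase2 (S : List (List Int)) (pF : List (List Int))
    (hlen : ∀ e ∈ pF, e.length = 1 ∨ e.length = 2) :
    ∀ j : Nat, scanB S pF j = phase2 (pairsIdxB S) (singlesIdxB S) pF (j : Int) := by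
  induction pF with
  | nil => intro j; rfl
  | cons e rest ih =>
    intro j
    have hcandeq :
        (if e.length = 2 then (pairsIdxB S).getD e [] else (singlesIdxB S).getD (e.getD 0 0) []) =
          (if e.length = 2 then candP S 0 e else candS S 0 (e.getD 0 0)) := by
      split
      · unfold pairsIdxB candP
        rw [pairsIdx_fold_getD]
        simp
      · unfold singlesIdxB candS
        rw [singlesIdx_fold_getD]
        simp
    have hfge : firstGE (j : Int)
        (if e.length = 2 then (pairsIdxB S).getD e [] else (singlesIdxB S).getD (e.getD 0 0) []) =
        (findIdxB S e j).map (fun k => (k : Int)) := by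
      rw [hcandeq]
      by_cases hl : e.length = 2
      · rw [if_pos hl]
        obtain ⟨⟨hs, _⟩, hmem⟩ := candP_spec e S 0
        apply firstGE_eq_findIdxB S e _ hs _ j
        intro x
        rw [hmem x]
        constructor
        · rintro ⟨k, hk, hx, hS⟩
          exact ⟨k, hk, by omega, by rw [if_pos hl]; exact hS.symm⟩
        · rintro ⟨k, hk, hx, hS⟩
          rw [if_pos hl] at hS
          exact ⟨k, hk, by omega, hS.symm⟩
      · rw [if_neg hl]
        obtain ⟨⟨hs, _⟩, hmem⟩ := candS_spec (e.getD 0 0) S 0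
        apply firstGE_eq_findIdxB S e _ hs _ j
        intro x
        rw [hmem x]
        constructor
        · rintro ⟨k, hk, hx, hS⟩
          exact ⟨k, hk, by omega, by rw [if_neg hl]; exact hS⟩
        · rintro ⟨k, hk, hx, hS⟩
          rw [if_neg hl] at hS
          exact ⟨k, hk, by omega, hS⟩
    rw [scanB, phase2]
    simp only [hfge]
    cases hfi : findIdxB S e j with
    | none => rfl
    | some k =>
      simp only [Option.map_some]
      rw [ih (fun x hx => hlen x (by simp [hx])) (k + 1)]
      push_cast
      rfl

-- ---- branch-1 equality under Pre_ ----

theorem branch1_eq (S : List (List Int)) (F : List Int) (hmem : ∀ f ∈ F, [f] ∈ S) :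
    F.map (fun f => (((PySem.List.index? S [f]).getD 0 : Nat) : Int)) =
      F.map (fun f => (((firstOccB S).get? [f]).getD 0)) := by
  apply List.map_congr_left
  intro f hf
  rw [firstOcc_get?_of_mem S [f] (hmem f hf)]
  cases hidx : PySem.List.index? S [f] with
  | none =>
    rw [PySem.List.index?_eq_none_iff] at hidx
    exact absurd (hmem f hf) hidx
  | some k => simp

-- Pre_'s membership hypothesis applies when the single-domain branch is taken
theorem max_len_one (S : List (List Int))
    (h : (PySem.List.max? (S.map fun s => (s.length : Int)) (fun x => x)).getD 0 = 1)
    (hne : S ≠ []) :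
    (∀ s ∈ S, s.length ≤ 1) ∧ (∃ s ∈ S, s.length = 1) := by
  cases hmax : PySem.List.max? (S.map fun s => (s.length : Int)) (fun x => x) with
  | none =>
    rw [PySem.List.max?_eq_none_iff] at hmax
    simp at hmax
    exact absurd hmax hne
  | some m =>
    rw [hmax] at h
    simp at h
    subst h
    constructor
    · intro s hs
      have := PySem.List.max?_isMax hmax ((s.length : Int)) (by simp; exact ⟨s, hs, rfl⟩)
      simpa using this
    · have hm := PySem.List.max?_mem hmax
      simp at hm
      obtain ⟨s, hs, hsl⟩ := hm
      exact ⟨s, hs, by omega⟩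

-- ===== VERDICT (by name: the statement is the Claim_ definition above) =====
theorem splitDomain_spec : Claim_equal_splitDomain := by
  intro S F _ hpre
  obtain ⟨hne, hidx⟩ := hpre
  unfold Spec_splitDomain splitDomain splitDomain_alt
  split
  · next h => exact branch1_eq S F (hidx (max_len_one S h hne))
  · split
    · rfl
    · have hA : pairLoopA F 0 = pairAux none F := by simpa using pairLoopA_eq_pairAux F 0
      rw [fold_pairAux F none [], List.nil_append, hA]
      rw [scanA_eq_scanB S (pairAux none F) (pairAux_len F none) 0 0 []]
      simp only [List.nil_append, List.drop_zero]
      rw [scanB_eq_phase2 S (pairAux none F) (pairAux_len F none) 0]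
      norm_num
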